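-- pv_equiv track=rewrite | github.com/Qi-Sun/SuzhouProjects | CityMotif/Pycode/src/mobility.py | deal_after_separate
-- ===== SOURCE A (Python) =====
-- def combine_neighbor(l):
--     length = len(l)
--     for x in range(length - 1, 0, -1):
--         if l[x] == l[x - 1]:
--             del l[x]
--     return l
--
-- def deal_after_separate(separate_routes, residence_city):
--     rst = []
--     for route in separate_routes:
--         new_route = combine_neighbor(route)  # 合并相邻点
--         tmp_new_route = new_route[:]
--         for i in range(len(tmp_new_route) - 1, -1, -1):
--             if tmp_new_route[i] == residence_city:
--                 del tmp_new_route[i]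
--         if len(tmp_new_route) == 0:  # 删除无效路线
--             continue
--         if new_route[0] != residence_city:  # 补充长居地作为首尾
--             new_route.insert(0, residence_city)
--         if new_route[len(new_route) - 1] != residence_city:
--             new_route.append(residence_city)
--         rst.append(new_route)
--     return rst
-- ===== SOURCE B (Python) =====
-- def deal_after_separate(separate_routes, residence_city):
--     # One forward pass per route: adjacent-dedup with an accumulator,
--     # any()-check for a non-residence point, brackets built by concatenation.
--     # Note: unlike the original, this does not mutate the input routes.
--     rst = []
--     for route in separate_routes:
--         d = []
--         for x in route:
--             if not d or d[-1] != x: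
--                 d.append(x)
--         if any(x != residence_city for x in d):
--             head = [residence_city] if d[0] != residence_city else []
--             tail = [residence_city] if d[-1] != residence_city else []
--             rst.append(head + d + tail)
--     return rst
-- ===== Notes on version B (the rewrite author's own statement) =====
-- stated objective: alternative
-- what changed: Replaces the two backward in-place deletion loops per route with one forward accumulator pass for adjacent dedup plus an any() emptiness check, building the residence brackets by concatenation; B also does not mutate the input routes (return values are identical).
import Mathlib
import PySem

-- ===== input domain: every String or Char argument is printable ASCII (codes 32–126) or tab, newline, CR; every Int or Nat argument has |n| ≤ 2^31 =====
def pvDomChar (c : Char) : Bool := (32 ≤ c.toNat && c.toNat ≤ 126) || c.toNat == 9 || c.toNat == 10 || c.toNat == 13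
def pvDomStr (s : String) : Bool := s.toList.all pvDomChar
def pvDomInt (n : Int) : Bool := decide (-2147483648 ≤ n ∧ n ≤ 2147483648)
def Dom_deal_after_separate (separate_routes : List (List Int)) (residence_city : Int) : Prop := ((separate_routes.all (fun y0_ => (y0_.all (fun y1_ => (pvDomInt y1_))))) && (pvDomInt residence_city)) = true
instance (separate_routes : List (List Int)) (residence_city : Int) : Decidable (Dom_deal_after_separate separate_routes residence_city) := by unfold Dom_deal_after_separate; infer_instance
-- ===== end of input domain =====

-- B replaces A's backward in-place deletion loops per route with one forward dedup pass
-- and an any() check; equivalence is about the RETURN value only (A mutates the input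
-- routes in place, B does not).

-- ===== PORT A =====
-- del l[i] for a valid index 0 ≤ i < l.length (exact there)
def pvDelAt (l : List Int) (i : Nat) : List Int := l.take i ++ l.drop (i + 1)

-- combine_neighbor's loop: x runs len-1, len-2, …, 1; the current index x always
-- satisfies x < l.length (downward iteration, each del removes one element at index x),
-- so l.getD x 0 is exactly Python's l[x].
def pvCnLoop (l : List Int) : Nat → List Int
  | 0 => l
  | x + 1 => pvCnLoop (if l.getD (x + 1) 0 = l.getD x 0 then pvDelAt l (x + 1) else l) x

def pvCombineNeighbor (l : List Int) : List Int := pvCnLoop l (l.length - 1)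

-- the residence-removal loop: i runs len-1, …, 0 (fuel = i+1); indices stay in range as above
def pvRmLoop (c : Int) (l : List Int) : Nat → List Int
  | 0 => l
  | i + 1 => pvRmLoop c (if l.getD i 0 = c then pvDelAt l i else l) i

-- the body of A's loop over separate_routes
def pvStepA (residence_city : Int) (rst : List (List Int)) (route : List Int) : List (List Int) :=
  let new_route := pvCombineNeighbor route
  let tmp_new_route := pvRmLoop residence_city new_route new_route.length
  if tmp_new_route.length = 0 then rst
  else
    let nr1 := if new_route.getD 0 0 ≠ residence_city then residence_city :: new_route else new_route
    let nr2 := if nr1.getD (nr1.length - 1) 0 ≠ residence_city then nr1 ++ [residence_city] else nr1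
    rst ++ [nr2]

def deal_after_separate (separate_routes : List (List Int)) (residence_city : Int) : List (List Int) :=
  separate_routes.foldl (pvStepA residence_city) []

-- ===== PORT B =====
-- the body of B's loop over separate_routes: forward accumulator dedup, any() check, brackets
def pvStepB (residence_city : Int) (rst : List (List Int)) (route : List Int) : List (List Int) :=
  let d := route.foldl (fun d x => if d = [] ∨ d.getLast? ≠ some x then d ++ [x] else d) []
  if d.any (fun x => x ≠ residence_city) then
    rst ++ [(if d.headD 0 ≠ residence_city then [residence_city] else []) ++ d ++
            (if d.getLastD 0 ≠ residence_city then [residence_city] else [])]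
  else rst

def deal_after_separate_alt (separate_routes : List (List Int)) (residence_city : Int) : List (List Int) :=
  separate_routes.foldl (pvStepB residence_city) []

-- ===== PRECONDITION & SPEC =====
def Spec_deal_after_separate (separate_routes : List (List Int)) (residence_city : Int) (out : List (List Int)) : Prop := out = deal_after_separate_alt separate_routes residence_city
instance (separate_routes : List (List Int)) (residence_city : Int) (out : List (List Int)) : Decidable (Spec_deal_after_separate separate_routes residence_city out) := by unfold Spec_deal_after_separate; infer_instance

-- ===== CLAIM (what is proved, stated in full; the proofs are below) =====
def Claim_equal_deal_after_separate : Prop := ∀ (separate_routes : List (List Int)) (residence_city : Int), Dom_deal_after_separate separate_routes residence_city → Spec_deal_after_separate separate_routes residence_city (deal_after_separate separate_routes residence_city)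

-- ===== LEMMAS AND PROOFS =====

-- forward adjacent-dedup carrying the previous original element (proof-only helper)
def pvFd (prev : Option Int) : List Int → List Int
  | [] => []
  | x :: t => if some x = prev then pvFd prev t else x :: pvFd (some x) t

lemma getLast?_cons_or (y : Int) (t : List Int) :
    (y :: t).getLast? = t.getLast?.or (some y) := by
  cases t with
  | nil => rfl
  | cons z t' =>
    rw [List.getLast?_cons_cons]
    cases h : (z :: t').getLast? with
    | none => simp [List.getLast?_eq_none_iff] at h
    | some b => simp

lemma pvFd_append_single (ys : List Int) (prev : Option Int) (a : Int) :
    pvFd prev (ys ++ [a]) =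
      pvFd prev ys ++ (if ys.getLast?.or prev = some a then [] else [a]) := by
  induction ys generalizing prev with
  | nil =>
    by_cases h : some a = prev <;> simp_all [pvFd, eq_comm]
  | cons y t ih =>
    simp only [List.cons_append, pvFd]
    rw [getLast?_cons_or, Option.or_assoc, Option.some_or]
    by_cases hy : some y = prev
    · rw [if_pos hy, if_pos hy, ih, hy]
    · rw [if_neg hy, if_neg hy, ih]
      simp

lemma pvDelAt_take (l : List Int) (i j : Nat) (h : j ≤ i) (h2 : i ≤ l.length) :
    (pvDelAt l i).take j = l.take j := by
  rw [pvDelAt, List.take_append, List.length_take, List.take_take,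
      Nat.min_eq_left h2, Nat.min_eq_left h, Nat.sub_eq_zero_of_le h]
  simp

lemma pvDelAt_drop_self (l : List Int) (i : Nat) (h : i ≤ l.length) :
    (pvDelAt l i).drop i = l.drop (i + 1) := by
  rw [pvDelAt, List.drop_append]
  simp [h]

lemma pvDelAt_length (l : List Int) (i : Nat) (h : i < l.length) :
    (pvDelAt l i).length = l.length - 1 := by
  simp [pvDelAt]; omega

lemma take_succ_getD (l : List Int) (i : Nat) (h : i < l.length) :
    l.take (i + 1) = l.take i ++ [l.getD i 0] := by
  rw [List.take_add_one]
  simp [List.getElem?_eq_getElem h, List.getD]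

lemma getLast?_take_succ (l : List Int) (i : Nat) (h : i < l.length) :
    (l.take (i + 1)).getLast? = some (l.getD i 0) := by
  rw [take_succ_getD l i h]; simp

lemma drop_cons_getD (l : List Int) (i : Nat) (h : i < l.length) :
    l.drop i = l.getD i 0 :: l.drop (i + 1) := by
  rw [List.drop_eq_getElem_cons h]
  simp [List.getD, List.getElem?_eq_getElem h]

lemma pvCnLoop_eq (x : Nat) : ∀ (l : List Int), x < l.length ∨ x = 0 →
    pvCnLoop l x = pvFd none (l.take (x + 1)) ++ l.drop (x + 1) := by
  induction x with
  | zero => intro l _; cases l <;> simp [pvCnLoop, pvFd]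
  | succ x ih =>
    intro l h
    have hx : x + 1 < l.length := by omega
    simp only [pvCnLoop]
    by_cases hdup : l.getD (x + 1) 0 = l.getD x 0
    · rw [if_pos hdup]
      have hlen : x < (pvDelAt l (x + 1)).length := by
        rw [pvDelAt_length l (x + 1) hx]; omega
      rw [ih _ (Or.inl hlen),
          pvDelAt_take l (x + 1) (x + 1) le_rfl (by omega),
          pvDelAt_drop_self l (x + 1) (by omega),
          take_succ_getD l (x + 1) hx, pvFd_append_single,
          getLast?_take_succ l x (by omega),
          Option.some_or, if_pos (by rw [hdup])]
      simp
    · rw [if_neg hdup,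
          ih l (Or.inl (by omega)),
          take_succ_getD l (x + 1) hx, pvFd_append_single,
          getLast?_take_succ l x (by omega),
          Option.some_or,
          if_neg (by intro hh; exact hdup (by injection hh with hh'; exact hh'.symm)),
          drop_cons_getD l (x + 1) hx]
      simp

lemma pvCombineNeighbor_eq (l : List Int) : pvCombineNeighbor l = pvFd none l := by
  unfold pvCombineNeighbor
  cases l with
  | nil => simp [pvCnLoop, pvFd]
  | cons a t =>
    rw [pvCnLoop_eq _ _ (Or.inl (by simp))]
    simp

lemma pvRmLoop_eq (c : Int) (i : Nat) : ∀ (l : List Int), i ≤ l.length →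
    pvRmLoop c l i = (l.take i).filter (fun x => x ≠ c) ++ l.drop i := by
  induction i with
  | zero => intro l _; simp [pvRmLoop]
  | succ i ih =>
    intro l h
    have hx : i < l.length := by omega
    simp only [pvRmLoop]
    by_cases hc : l.getD i 0 = c
    · rw [if_pos hc]
      have hlen : i ≤ (pvDelAt l i).length := by rw [pvDelAt_length l i hx]; omega
      rw [ih _ hlen, pvDelAt_take l i i le_rfl (by omega), pvDelAt_drop_self l i (by omega),
          take_succ_getD l i hx]
      have hc' : l[i]?.getD 0 = c := by simpa [List.getD] using hc
      simp [List.getD, hc']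
    · rw [if_neg hc, ih l (by omega), take_succ_getD l i hx, drop_cons_getD l i hx]
      have hc' : ¬ l[i]?.getD 0 = c := by simpa [List.getD] using hc
      simp [List.getD, hc']

lemma pvFoldl_dedup_eq (l : List Int) : ∀ (d : List Int),
    l.foldl (fun d x => if d = [] ∨ d.getLast? ≠ some x then d ++ [x] else d) d
      = d ++ pvFd d.getLast? l := by
  induction l with
  | nil => intro d; simp [pvFd]
  | cons x t ih =>
    intro d
    simp only [List.foldl_cons, pvFd]
    by_cases hx : some x = d.getLast?
    · have hd : d ≠ [] := by intro h; simp [h] at hx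
      rw [if_neg (by rw [not_or]; exact ⟨hd, not_not.mpr hx.symm⟩), ih, if_pos hx]
    · rw [if_pos (Or.inr (fun h => hx h.symm)), ih, if_neg hx, List.getLast?_concat]
      simp

lemma getD_last (a : Int) (t : List Int) : (a :: t).getD t.length 0 = (a :: t).getLastD 0 := by
  simp [List.getD, List.getLastD_eq_getLast?, List.getLast?_eq_getElem?]

-- per-route equality of the two loop bodies
lemma pv_route_step (c : Int) (rst : List (List Int)) (route : List Int) :
    pvStepA c rst route = pvStepB c rst route := by
  have hd : route.foldl (fun d x => if d = [] ∨ d.getLast? ≠ some x then d ++ [x] else d) []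
      = pvFd none route := by
    rw [pvFoldl_dedup_eq route []]; simp
  simp only [pvStepA, pvStepB, hd, pvCombineNeighbor_eq]
  generalize pvFd none route = nr
  rw [pvRmLoop_eq c nr.length nr le_rfl]
  simp only [List.take_length, List.drop_length, List.append_nil]
  by_cases hany : nr.any (fun x => x ≠ c)
  · rw [if_pos hany]
    have hfil : ¬ (nr.filter (fun x => x ≠ c)).length = 0 := by
      simp only [List.length_eq_zero_iff, List.filter_eq_nil_iff]
      intro hall
      rcases List.any_eq_true.mp hany with ⟨x, hx, hxc⟩
      exact (by simpa using hxc : x ≠ c) (by simpa using hall x hx)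
    rw [if_neg hfil]
    cases nr with
    | nil => simp at hany
    | cons a t =>
      have h0 : (a :: t).getD 0 0 = a := rfl
      have hh : (a :: t).headD 0 = a := rfl
      rw [h0, hh]
      by_cases ha : a = c
      · subst ha
        rw [if_neg (show ¬ (a ≠ a) from not_not_intro rfl)]
        have hgd : (a :: t).getD ((a :: t).length - 1) 0 = (a :: t).getLastD 0 := by
          rw [List.length_cons, Nat.add_sub_cancel, getD_last]
        rw [hgd]
        by_cases hl : (a :: t).getLastD 0 = a
        · rw [if_neg (show ¬ ((a :: t).getLastD 0 ≠ a) from not_not_intro hl)]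
          simp [-List.getLastD_eq_getLast?, hl]
        · rw [if_pos hl]
          simp [-List.getLastD_eq_getLast?, hl]
      · rw [if_pos (show a ≠ c from ha)]
        have hgd : (c :: a :: t).getD ((c :: a :: t).length - 1) 0 = (a :: t).getLastD 0 := by
          have hlen : (c :: a :: t).length - 1 = t.length + 1 := by simp
          rw [hlen, List.getD_cons_succ, getD_last]
        rw [hgd]
        by_cases hl : (a :: t).getLastD 0 = c
        · rw [if_neg (show ¬ ((a :: t).getLastD 0 ≠ c) from not_not_intro hl)]
          simp [-List.getLastD_eq_getLast?, ha, hl]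
        · rw [if_pos hl]
          simp [-List.getLastD_eq_getLast?, ha, hl]
  · rw [if_neg hany]
    have hane : ∀ x ∈ nr, x = c := by simpa using hany
    have hfe : nr.filter (fun x => x ≠ c) = [] := by
      rw [List.filter_eq_nil_iff]
      intro x hx
      simp [hane x hx]
    rw [hfe]
    simp

lemma pv_foldl_eq (c : Int) (srs : List (List Int)) : ∀ (acc : List (List Int)),
    srs.foldl (pvStepA c) acc = srs.foldl (pvStepB c) acc := by
  induction srs with
  | nil => intro acc; rfl
  | cons r t ih =>
    intro acc
    rw [List.foldl_cons, List.foldl_cons, pv_route_step, ih]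

-- ===== VERDICT (by name: the statement is the Claim_ definition above) =====
theorem deal_after_separate_spec : Claim_equal_deal_after_separate := by
  intro srs c _
  unfold Spec_deal_after_separate deal_after_separate deal_after_separate_alt
  exact pv_foldl_eq c srs []
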